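-- pv_equiv track=rewrite | github.com/MalikHamza7/wcd-raptor | modules/cdn_detector.py | _extract_cache_headers
-- ===== SOURCE A (Python) =====
-- from typing import Dict, Optional
--
-- def _extract_cache_headers(headers: Dict[str, str]) -> Dict[str, str]:
--     """Extract cache-related headers"""
--     cache_headers = {}
--     cache_header_names = [
--         'cache-control', 'etag', 'expires', 'last-modified',
--         'x-cache', 'x-cache-status', 'cf-cache-status',
--         'x-served-by', 'x-cache-hits', 'age'
--     ]
--
--     for header_name in cache_header_names:
--         if header_name in headers:
--             cache_headers[header_name] = headers[header_name]
--
--     return cache_headers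
-- ===== SOURCE B (Python) =====
-- _CACHE_NAMES = [
--     'cache-control', 'etag', 'expires', 'last-modified',
--     'x-cache', 'x-cache-status', 'cf-cache-status',
--     'x-served-by', 'x-cache-hits', 'age'
-- ]
-- _CACHE_RANK = {name: i for i, name in enumerate(_CACHE_NAMES)}
--
--
-- def _extract_cache_headers(headers):
--     """Extract cache-related headers: one pass over the input, then an
--     index-sort to restore the canonical name order."""
--     hits = [(_CACHE_RANK[k], k, v) for k, v in headers.items() if k in _CACHE_RANK]
--     hits.sort(key=lambda t: t[0])
--     return {k: v for _, k, v in hits}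
-- ===== Notes on version B (the rewrite author's own statement) =====
-- stated objective: alternative
-- what changed: B inverts the traversal: instead of looping over the fixed name list and probing the dict per name, it makes one pass over the input items tagging each cache header with its precomputed rank, sorts the hits by rank, and rebuilds the dict; the per-name dict probes disappear.
import Mathlib
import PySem

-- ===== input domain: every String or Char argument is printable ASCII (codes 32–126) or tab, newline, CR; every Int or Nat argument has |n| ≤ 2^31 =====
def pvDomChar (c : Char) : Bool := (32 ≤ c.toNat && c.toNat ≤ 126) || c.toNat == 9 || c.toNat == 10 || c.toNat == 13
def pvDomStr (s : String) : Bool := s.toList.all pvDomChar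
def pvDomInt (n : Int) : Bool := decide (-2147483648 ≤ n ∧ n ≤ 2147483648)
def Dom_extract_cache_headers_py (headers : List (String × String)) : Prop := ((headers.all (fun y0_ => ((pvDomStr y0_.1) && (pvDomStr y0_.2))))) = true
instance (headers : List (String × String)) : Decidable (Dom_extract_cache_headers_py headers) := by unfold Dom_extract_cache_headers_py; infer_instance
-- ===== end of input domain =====

-- B replaces A's probe-per-fixed-name loop by one pass over the input items (tagging each
-- cache header with its precomputed rank), a sort by rank, and a rebuild (objective: alternative).


-- ===== PORT A =====
def pvCacheNames : List String :=
  ["cache-control", "etag", "expires", "last-modified",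
   "x-cache", "x-cache-status", "cf-cache-status",
   "x-served-by", "x-cache-hits", "age"]

-- 'headers[header_name]' under the 'header_name in headers' guard is exact as getD with any default.
def extract_cache_headers_py (headers : List (String × String)) : List (String × String) :=
  (pvCacheNames.foldl
    (fun (acc : PySem.Dict String String) name =>
      if (PySem.Dict.ofList headers).contains name then
        acc.insert name ((PySem.Dict.ofList headers).getD name "") else acc)
    PySem.Dict.empty).items

-- ===== PORT B =====
def pvCacheRank : PySem.Dict String Int :=
  PySem.Dict.ofList ((PySem.List.enumerate pvCacheNames 0).map (fun p => (p.2, p.1)))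

def extract_cache_headers_py_alt (headers : List (String × String)) : List (String × String) :=
  (PySem.List.sorted
    (headers.filterMap (fun kv =>
      match pvCacheRank.get? kv.1 with
      | some r => some (r, kv.1, kv.2)
      | none => none))
    (fun t => t.1)).map (fun t => (t.2.1, t.2.2))

-- ===== PRECONDITION & SPEC =====
-- The assoc list stands for a Python dict, whose keys are necessarily distinct; a list with
-- duplicate keys represents no Python input, so Pre_ requires the keys to be pairwise distinct.
def Pre_extract_cache_headers_py (headers : List (String × String)) : Prop :=
  (headers.map Prod.fst).Nodup
instance (headers : List (String × String)) : Decidable (Pre_extract_cache_headers_py headers) := by unfold Pre_extract_cache_headers_py; infer_instance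

def pvWitness_extract_cache_headers_py : (List (String × String)) :=
  [("etag", "x"), ("age", "1"), ("foo", "y")]

def Spec_extract_cache_headers_py (headers : List (String × String)) (out : List (String × String)) : Prop := out = extract_cache_headers_py_alt headers
instance (headers : List (String × String)) (out : List (String × String)) : Decidable (Spec_extract_cache_headers_py headers out) := by unfold Spec_extract_cache_headers_py; infer_instance

-- ===== CLAIM (what is proved, stated in full; the proofs are below) =====
def Claim_equal_extract_cache_headers_py : Prop := ∀ (headers : List (String × String)), Dom_extract_cache_headers_py headers → Pre_extract_cache_headers_py headers → Spec_extract_cache_headers_py headers (extract_cache_headers_py headers)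

-- ===== LEMMAS AND PROOFS =====

-- Under distinct keys, the dict built from the list has exactly the list as items.
lemma items_ofList (headers : List (String × String))
    (h : (headers.map Prod.fst).Nodup) :
    (PySem.Dict.ofList headers).items = headers := by
  have := PySem.Dict.items_foldl_insert_fresh headers (fun p => p.1) (fun p => p.2)
    PySem.Dict.empty (by intro a _; simp [PySem.Dict.contains_empty]) (by simpa using h)
  simpa [PySem.Dict.ofList, PySem.Dict.update] using this

lemma keys_nodup_ofList (headers : List (String × String))
    (h : (headers.map Prod.fst).Nodup) :
    (PySem.Dict.ofList headers).keys.Nodup := by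
  have : (PySem.Dict.ofList headers).keys = headers.map Prod.fst := by
    simp [PySem.Dict.keys, items_ofList headers h]
  rw [this]; exact h

-- Both sides reduce to the canonical list: matched names in fixed order, with their values.
lemma a_eq_canon (headers : List (String × String)) :
    extract_cache_headers_py headers =
      (pvCacheNames.filter (fun n => (PySem.Dict.ofList headers).contains n)).map
        (fun n => (n, (PySem.Dict.ofList headers).getD n "")) := by
  unfold extract_cache_headers_py
  rw [← List.foldl_filter]
  rw [PySem.Dict.items_foldl_insert_fresh _ (fun n => n)
    (fun n => (PySem.Dict.ofList headers).getD n "") PySem.Dict.empty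
    (by intro a _; simp [PySem.Dict.contains_empty])
    (by simpa using (by decide : pvCacheNames.Nodup).filter _)]
  simp [PySem.Dict.empty]

lemma b_eq_canon (headers : List (String × String))
    (h : (headers.map Prod.fst).Nodup) :
    extract_cache_headers_py_alt headers =
      (pvCacheNames.filter (fun n => (PySem.Dict.ofList headers).contains n)).map
        (fun n => (n, (PySem.Dict.ofList headers).getD n "")) := by
  have hnd : (PySem.Dict.ofList headers).keys.Nodup := keys_nodup_ofList headers h
  have hitems : (PySem.Dict.ofList headers).items = headers := items_ofList headers h
  set hd := PySem.Dict.ofList headers with hhd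
  set f : String × String → Option (Int × String × String) := fun kv =>
    match pvCacheRank.get? kv.1 with
    | some r => some (r, kv.1, kv.2)
    | none => none with hf
  have hfc : ∀ kv t, f kv = some t ↔ pvCacheRank.get? kv.1 = some t.1 ∧ t.2 = kv := by
    intro kv t
    obtain ⟨t1, t2⟩ := t
    cases hr : pvCacheRank.get? kv.1 <;>
      simp [hf, hr, Prod.ext_iff, eq_comm]
  have hkeysrank : pvCacheRank.keys = pvCacheNames := by decide
  have hrk2 : ∀ n ∈ pvCacheNames, pvCacheRank.get? n = some (pvCacheRank.getD n 0) := by decide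
  have hmemh : ∀ kv : String × String, kv ∈ headers ↔ hd.get? kv.1 = some kv.2 := by
    intro kv
    rw [← hitems]
    exact (PySem.Dict.get?_eq_some_iff_mem_items hd kv.1 kv.2 hnd).symm
  set ys := (pvCacheNames.filter (fun n => hd.contains n)).map
    (fun n => ((pvCacheRank.getD n 0 : Int), n, hd.getD n "")) with hys
  have hpw : List.Pairwise (fun (a b : Int × String × String) => a.1 < b.1) ys := by
    rw [hys, List.pairwise_map]
    exact List.Pairwise.filter _
      (by decide : pvCacheNames.Pairwise
        (fun a b => pvCacheRank.getD a 0 < pvCacheRank.getD b 0))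
  have hysnd : ys.Nodup := hpw.imp (fun hlt heq => by subst heq; exact lt_irrefl _ hlt)
  have hhitsnd : (headers.filterMap f).Nodup := by
    refine List.Nodup.filterMap ?_ (h.of_map)
    intro a a' b hb hb'
    have h1 := ((hfc a b).mp hb).2
    have h2 := ((hfc a' b).mp hb').2
    rw [← h1, ← h2]
  have hperm : ys.Perm (headers.filterMap f) := by
    rw [List.perm_ext_iff_of_nodup hysnd hhitsnd]
    intro t
    rw [hys, List.mem_map, List.mem_filterMap]
    constructor
    · rintro ⟨n, hn, rfl⟩
      rw [List.mem_filter] at hn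
      obtain ⟨hnmem, hc⟩ := hn
      have hsome : (hd.get? n).isSome := by
        rw [← PySem.Dict.contains_eq_isSome_get? hd n]; exact hc
      obtain ⟨v, hv⟩ := Option.isSome_iff_exists.mp hsome
      refine ⟨(n, v), (hmemh (n, v)).mpr hv, ?_⟩
      rw [hfc]
      exact ⟨hrk2 n hnmem, by simp [PySem.Dict.getD_of_get?_eq_some hd "" hv]⟩
    · rintro ⟨kv, hkv, hfkv⟩
      obtain ⟨hr, ht2⟩ := (hfc kv t).mp hfkv
      have hnmem : kv.1 ∈ pvCacheNames := by
        rw [← hkeysrank]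
        exact PySem.Dict.mem_keys_of_mem_items _
          (PySem.Dict.mem_items_of_get?_eq_some _ hr)
      have hget : hd.get? kv.1 = some kv.2 := (hmemh kv).mp hkv
      refine ⟨kv.1, List.mem_filter.mpr ⟨hnmem, ?_⟩, ?_⟩
      · rw [PySem.Dict.contains_eq_isSome_get?, hget]; rfl
      · have : pvCacheRank.getD kv.1 0 = t.1 :=
          PySem.Dict.getD_of_get?_eq_some pvCacheRank 0 hr
        rw [this, PySem.Dict.getD_of_get?_eq_some hd "" hget]
        rw [← ht2]
  have halt : extract_cache_headers_py_alt headers =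
      (PySem.List.sorted (headers.filterMap f) (fun t => t.1)).map
        (fun t => (t.2.1, t.2.2)) := rfl
  rw [halt, PySem.List.sorted_eq_of_perm_of_pairwise_lt _ ys _ hperm hpw,
    hys, List.map_map]
  rfl

-- ===== VERDICT (by name: the statement is the Claim_ definition above) =====
theorem extract_cache_headers_py_spec : Claim_equal_extract_cache_headers_py := by
  intro headers _ hpre
  unfold Spec_extract_cache_headers_py
  rw [a_eq_canon headers, b_eq_canon headers hpre]
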